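-- pv_equiv track=rewrite | github.com/Enjef/Algo | 1900 - 1999/1957 - Delete Characters to Make Fancy String/1957 - Delete Characters to Make Fancy String.py | makeFancyString_4th_best_speed
-- ===== SOURCE A (Python) =====
-- def makeFancyString_4th_best_speed(s):
--     x = ''
--     a, b = '*', '*'
--     for c in s:
--         if not a == b == c:
--             x += c
--         a, b = b, c
--     return x
-- ===== SOURCE B (Python) =====
-- def makeFancyString_4th_best_speed(s):
--     # Run-based: scan maximal runs of equal characters and keep at most two of each.
--     out = []
--     i, n = 0, len(s)
--     while i < n:
--         j = i
--         while j < n and s[j] == s[i]: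
--             j += 1
--         out.append(s[i] * min(j - i, 2))
--         i = j
--     return ''.join(out)
-- ===== Notes on version B (the rewrite author's own statement) =====
-- stated objective: alternative
-- what changed: B iterates over maximal runs of equal characters and emits min(run,2) copies of each, instead of A's per-character sliding two-character window with a '*' sentinel.
-- intended difference: On strings starting with '*', A's sentinel initial window a=b='*' treats the leading '*'-run as a continuation and drops all of it (on the witness '*' A returns the empty string), while B keeps min(run,2) leading '*'s, which is what the fancy-string task intends. — e.g. on makeFancyString_4th_best_speed("*"): A returns "", B returns "*"
import Mathlib
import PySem

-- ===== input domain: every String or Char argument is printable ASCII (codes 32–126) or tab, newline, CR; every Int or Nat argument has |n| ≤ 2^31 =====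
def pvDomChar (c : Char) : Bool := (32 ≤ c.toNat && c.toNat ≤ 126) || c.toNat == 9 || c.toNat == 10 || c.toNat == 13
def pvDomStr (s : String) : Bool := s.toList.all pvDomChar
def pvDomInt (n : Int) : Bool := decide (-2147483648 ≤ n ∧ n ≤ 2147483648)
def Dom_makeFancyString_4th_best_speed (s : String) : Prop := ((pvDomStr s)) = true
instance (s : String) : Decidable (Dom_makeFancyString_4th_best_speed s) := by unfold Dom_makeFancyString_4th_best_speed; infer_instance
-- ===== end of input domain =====

-- B replaces A's per-character two-character sliding window by a scan over maximal runs
-- (emit min(run,2) of each); same O(n) cost, different traversal (objective: alternative).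

-- ===== PORT A =====
-- state (x, a, b): output so far and the last two characters seen (sentinel '*')
def makeFancyString_4th_best_speed (s : String) : String :=
  let r := s.toList.foldl
    (fun (st : List Char × Char × Char) c =>
      if st.2.1 = st.2.2 ∧ st.2.2 = c then (st.1, st.2.2, c)
      else (st.1 ++ [c], st.2.2, c))
    ([], '*', '*')
  String.ofList r.1

-- ===== PORT B =====
-- Source B's outer while: split off one maximal run (inner while = takeWhile/dropWhile), record (char, length)
def pvRuns : List Char → List (Char × Nat)
  | [] => []
  | c :: t => (c, 1 + (t.takeWhile (fun d => d = c)).length) :: pvRuns (t.dropWhile (fun d => d = c))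
termination_by l => l.length
decreasing_by
  exact Nat.lt_succ_of_le (List.length_dropWhile_le _ _)

-- Source B's ''.join(out): each run contributes min(len,2) copies of its character
def makeFancyString_4th_best_speed_alt (s : String) : String :=
  String.ofList ((pvRuns s.toList).flatMap (fun p => List.replicate (min p.2 2) p.1))

-- ===== PRECONDITION & SPEC =====
-- On strings starting with '*', A's sentinel initial window a=b='*' treats the leading '*'-run as a
-- continuation and drops all of it (on the witness "*" A returns the empty string), while B keeps min(run,2) leading '*'s as intended.
def D_makeFancyString_4th_best_speed (s : String) : Prop := s.toList.head? = some '*'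
instance (s : String) : Decidable (D_makeFancyString_4th_best_speed s) := by
  unfold D_makeFancyString_4th_best_speed; infer_instance

def Spec_makeFancyString_4th_best_speed (s : String) (out : String) : Prop :=
  ¬ D_makeFancyString_4th_best_speed s → out = makeFancyString_4th_best_speed_alt s
instance (s : String) (out : String) : Decidable (Spec_makeFancyString_4th_best_speed s out) := by
  unfold Spec_makeFancyString_4th_best_speed; infer_instance

def pvDiffWitness_makeFancyString_4th_best_speed : String := "*"
def pvDiffWitnessOut_makeFancyString_4th_best_speed : String × String := ("", "*")

-- ===== CLAIM (what is proved, stated in full; the proofs are below) =====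
def Claim_unchanged_makeFancyString_4th_best_speed : Prop :=
  ∀ (s : String), Dom_makeFancyString_4th_best_speed s →
    Spec_makeFancyString_4th_best_speed s (makeFancyString_4th_best_speed s)

def Claim_changed_makeFancyString_4th_best_speed : Prop :=
  Dom_makeFancyString_4th_best_speed (pvDiffWitness_makeFancyString_4th_best_speed) ∧
  D_makeFancyString_4th_best_speed (pvDiffWitness_makeFancyString_4th_best_speed) ∧
  makeFancyString_4th_best_speed (pvDiffWitness_makeFancyString_4th_best_speed) = pvDiffWitnessOut_makeFancyString_4th_best_speed.1 ∧
  makeFancyString_4th_best_speed_alt (pvDiffWitness_makeFancyString_4th_best_speed) = pvDiffWitnessOut_makeFancyString_4th_best_speed.2 ∧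
  pvDiffWitnessOut_makeFancyString_4th_best_speed.1 ≠ pvDiffWitnessOut_makeFancyString_4th_best_speed.2

def Claim_exact_makeFancyString_4th_best_speed : Prop :=
  ∀ (s : String), Dom_makeFancyString_4th_best_speed s →
    D_makeFancyString_4th_best_speed s →
    makeFancyString_4th_best_speed s ≠ makeFancyString_4th_best_speed_alt s

-- ===== LEMMAS AND PROOFS =====

-- recursive characterisation of A's loop body
def pvFancy : Char → Char → List Char → List Char
  | _, _, [] => []
  | a, b, c :: t => if a = b ∧ b = c then pvFancy b c t else c :: pvFancy b c t

def pvEmit (rs : List (Char × Nat)) : List Char :=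
  rs.flatMap (fun p => List.replicate (min p.2 2) p.1)

lemma pvRuns_cons (c : Char) (t : List Char) :
    pvRuns (c :: t) =
      (c, 1 + (t.takeWhile (fun d => d = c)).length) :: pvRuns (t.dropWhile (fun d => d = c)) := by
  rw [pvRuns]

lemma pvEmit_cons (c : Char) (n : Nat) (rs : List (Char × Nat)) :
    pvEmit ((c, n) :: rs) = List.replicate (min n 2) c ++ pvEmit rs := by
  simp [pvEmit]

lemma foldA (l : List Char) : ∀ (x : List Char) (a b : Char),
    (l.foldl (fun (st : List Char × Char × Char) c =>
      if st.2.1 = st.2.2 ∧ st.2.2 = c then (st.1, st.2.2, c)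
      else (st.1 ++ [c], st.2.2, c)) (x, a, b)).1 = x ++ pvFancy a b l := by
  induction l with
  | nil => intro x a b; simp [pvFancy]
  | cons c t ih =>
      intro x a b
      by_cases h : a = b ∧ b = c
      · simp [List.foldl, h, pvFancy, ih]
      · simp [List.foldl, h, pvFancy, ih]

lemma A_eq_fancy (s : String) :
    makeFancyString_4th_best_speed s = String.ofList (pvFancy '*' '*' s.toList) := by
  unfold makeFancyString_4th_best_speed
  simp [foldA]

lemma alt_eq_emit (s : String) :
    makeFancyString_4th_best_speed_alt s = String.ofList (pvEmit (pvRuns s.toList)) := by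
  rfl

-- the joint run/window invariant, by strong induction on the length of the tail
lemma fancy_runs_aux : ∀ (N : ℕ) (t : List Char), t.length ≤ N →
    ((∀ b c : Char, b ≠ c → c :: pvFancy b c t = pvEmit (pvRuns (c :: t))) ∧
     (∀ c : Char, pvFancy c c t = pvEmit (pvRuns (t.dropWhile (fun d => d = c))))) := by
  intro N
  induction N with
  | zero =>
      intro t ht
      have : t = [] := List.length_eq_zero_iff.mp (Nat.le_zero.mp ht)
      subst this
      constructor
      · intro b c _; simp [pvFancy, pvRuns, pvEmit]
      · intro c; simp [pvFancy, pvRuns, pvEmit]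
  | succ n ih =>
      intro t ht
      constructor
      · intro b c hbc
        match t with
        | [] => simp [pvFancy, pvRuns, pvEmit]
        | d :: t' =>
          have ht' : t'.length ≤ n := by simp only [List.length_cons] at ht; omega
          by_cases hdc : d = c
          · subst hdc
            -- the run continues: both sides start with two copies of c
            have h3 := (ih t' ht').2 d
            have hL : pvFancy b d (d :: t') = d :: pvFancy d d t' := by
              simp only [pvFancy]
              rw [if_neg]
              intro hh; exact hbc hh.1
            have htw : List.takeWhile (fun e => decide (e = d)) (d :: t') =
                d :: List.takeWhile (fun e => decide (e = d)) t' := by simp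
            have hdw : List.dropWhile (fun e => decide (e = d)) (d :: t') =
                List.dropWhile (fun e => decide (e = d)) t' := by simp
            rw [pvRuns_cons, htw, hdw, pvEmit_cons, hL, h3]
            have hm : min (1 + (d :: List.takeWhile (fun e => decide (e = d)) t').length) 2 = 2 := by
              simp only [List.length_cons]; omega
            rw [hm]
            rfl
          · have h2 := (ih t' ht').1 c d (fun h => hdc h.symm)
            have hL : pvFancy b c (d :: t') = d :: pvFancy c d t' := by
              simp only [pvFancy]
              rw [if_neg]
              intro hh; exact hdc hh.2.symm
            have htw : List.takeWhile (fun e => decide (e = c)) (d :: t') = [] := by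
              simp [hdc]
            have hdw : List.dropWhile (fun e => decide (e = c)) (d :: t') = d :: t' := by
              simp [hdc]
            rw [pvRuns_cons, htw, hdw, pvEmit_cons, hL, ← h2]
            rfl
      · intro c
        match t with
        | [] => simp [pvFancy, pvRuns, pvEmit]
        | d :: t' =>
          have ht' : t'.length ≤ n := by simp only [List.length_cons] at ht; omega
          by_cases hdc : d = c
          · subst hdc
            have h3 := (ih t' ht').2 d
            simp only [List.dropWhile_cons, decide_true]
            have : pvFancy d d (d :: t') = pvFancy d d t' := by
              simp [pvFancy]
            rw [this, h3]
            simp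
          · have h2 := (ih t' ht').1 c d (fun h => hdc h.symm)
            have hdw : List.dropWhile (fun e => decide (e = c)) (d :: t') = d :: t' := by
              simp [hdc]
            have hL : pvFancy c c (d :: t') = d :: pvFancy c d t' := by
              simp only [pvFancy]
              rw [if_neg]
              intro hh; exact hdc hh.2.symm
            rw [hdw, hL, h2]

lemma fancy_cons_ne (b c : Char) (t : List Char) (h : b ≠ c) :
    c :: pvFancy b c t = pvEmit (pvRuns (c :: t)) :=
  ((fancy_runs_aux t.length t le_rfl).1) b c h

lemma fancy_drop (c : Char) (t : List Char) :
    pvFancy c c t = pvEmit (pvRuns (t.dropWhile (fun d => d = c))) :=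
  ((fancy_runs_aux t.length t le_rfl).2) c

-- ===== VERDICT (by name: the statement is the Claim_ definition above) =====
theorem makeFancyString_4th_best_speed_spec : Claim_unchanged_makeFancyString_4th_best_speed := by
  intro s _ hnd
  rw [A_eq_fancy, alt_eq_emit]
  match h : s.toList with
  | [] => simp [pvFancy, pvRuns, pvEmit]
  | c :: t =>
      have hc : c ≠ '*' := by
        intro hc
        exact hnd (by simp [D_makeFancyString_4th_best_speed, h, hc])
      have hL : pvFancy '*' '*' (c :: t) = c :: pvFancy '*' c t := by
        simp only [pvFancy]
        rw [if_neg]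
        intro hh; exact hc hh.2.symm
      rw [hL, fancy_cons_ne '*' c t (Ne.symm hc)]

theorem makeFancyString_4th_best_speed_changed : Claim_changed_makeFancyString_4th_best_speed := by
  unfold Claim_changed_makeFancyString_4th_best_speed
  refine ⟨by decide, by decide, rfl, ?_, by decide⟩
  rw [alt_eq_emit]
  have h1 : (pvDiffWitness_makeFancyString_4th_best_speed).toList = ['*'] := rfl
  rw [h1, pvRuns_cons]
  simp [pvRuns, pvEmit, pvDiffWitnessOut_makeFancyString_4th_best_speed]

theorem makeFancyString_4th_best_speed_tight : Claim_exact_makeFancyString_4th_best_speed := by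
  intro s _ hd heq
  unfold D_makeFancyString_4th_best_speed at hd
  rw [A_eq_fancy, alt_eq_emit] at heq
  match h : s.toList with
  | [] => rw [h] at hd; simp at hd
  | c :: t =>
      rw [h] at hd
      have hc : c = '*' := by simpa using hd
      subst hc
      rw [h] at heq
      -- A drops the whole leading '*' run, B keeps at least one '*': lengths differ
      have hA : pvFancy '*' '*' ('*' :: t) = pvEmit (pvRuns (t.dropWhile (fun d => d = '*'))) := by
        have h0 : pvFancy '*' '*' ('*' :: t) = pvFancy '*' '*' t := by
          simp [pvFancy]
        rw [h0, fancy_drop]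
      have hlst : pvFancy '*' '*' ('*' :: t) = pvEmit (pvRuns ('*' :: t)) := by
        have h2 := congrArg String.toList heq
        simpa using h2
      rw [hA, pvRuns_cons, pvEmit_cons] at hlst
      have hlen := congrArg List.length hlst
      simp only [List.length_append, List.length_replicate] at hlen
      omega
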